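-- pv_equiv track=rewrite | github.com/yowolf/Fundamental-Limitations-of-Alignment-in-LLMs | behavior_expectation_misalignment_graphs/RLHF/misalignment_RLHF.py | stop_at_inst
-- ===== SOURCE A (Python) =====
-- def stop_at_inst(prompt):
--     l = len("[/INST]")
--     indices = []
--     for i in range(len(prompt)-l,-1,-1):
--         if prompt[i:i+l]=='[/INST]':
--             indices.append(i+l)
--     indices.reverse()
--     return(indices)
-- ===== SOURCE B (Python) =====
-- def stop_at_inst(prompt):
--     indices = []
--     pos = 0
--     while True:
--         j = prompt.find('[/INST]', pos)
--         if j == -1: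
--             break
--         indices.append(j + 7)
--         pos = j + 1
--     return indices
-- ===== Notes on version B (the rewrite author's own statement) =====
-- stated objective: faster
-- what changed: Replaces the backwards per-index slice-comparison loop plus final reverse with a forward while-loop that uses str.find to jump from occurrence to occurrence, building the result in ascending order directly.
import Mathlib
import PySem

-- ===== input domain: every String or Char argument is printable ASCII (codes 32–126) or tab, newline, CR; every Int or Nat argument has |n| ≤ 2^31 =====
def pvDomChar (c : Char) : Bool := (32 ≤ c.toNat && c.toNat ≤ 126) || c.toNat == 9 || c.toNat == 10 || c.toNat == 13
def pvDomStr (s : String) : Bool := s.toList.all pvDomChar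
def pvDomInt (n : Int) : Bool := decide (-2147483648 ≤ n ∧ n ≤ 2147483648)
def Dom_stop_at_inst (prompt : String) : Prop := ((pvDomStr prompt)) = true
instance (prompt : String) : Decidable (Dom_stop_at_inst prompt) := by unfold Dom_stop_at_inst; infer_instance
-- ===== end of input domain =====

-- B replaces A's backwards per-index slice-comparison loop (plus a final reverse) with a
-- forward while-loop that jumps from occurrence to occurrence with str.find (idiomatic).

-- ===== PORT A =====
def stop_at_inst (prompt : String) : List Int :=
  let l : Int := PySem.Str.len "[/INST]"
  let indices : List Int :=
    (PySem.List.pyRange (PySem.Str.len prompt - l) (-1) (-1)).foldl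
      (fun indices i =>
        if PySem.Str.slice prompt (some i) (some (i + l)) == "[/INST]" then indices ++ [i + l]
        else indices) []
  indices.reverse

-- ===== PORT B =====
-- facts about str.find needed by the while-loop's termination (pos strictly increases, stays in range)
theorem findFrom_facts (s : List Char) (pos : Nat) (h : pos ≤ s.length)
    (hj : PySem.Chars.findFrom s "[/INST]".toList (pos : Int) ≠ -1) :
    (pos : Int) ≤ PySem.Chars.findFrom s "[/INST]".toList (pos : Int) ∧
      (PySem.Chars.findFrom s "[/INST]".toList (pos : Int)).toNat + 7 ≤ s.length := by
  obtain ⟨h1, h2, -⟩ := PySem.Chars.findFrom_natCast_spec s "[/INST]".toList pos h hj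
  refine ⟨h1, ?_⟩
  have h3 : ("[/INST]".toList).length ≤ (s.drop (PySem.Chars.findFrom s "[/INST]".toList (pos : Int)).toNat).length := h2.length_le
  rw [List.length_drop] at h3
  have h4 : ("[/INST]".toList).length = 7 := rfl
  omega

-- the while loop of B: maintains only the running search position pos
def stop_at_inst_go (prompt : String) (pos : Nat) (h : pos ≤ prompt.toList.length) : List Int :=
  let j := PySem.Str.findFrom prompt "[/INST]" (pos : Int) none
  if hj : j = -1 then []
  else
    (j + 7) :: stop_at_inst_go prompt (j.toNat + 1)
      (by
        have hf := findFrom_facts prompt.toList pos h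
          (by simpa [j, PySem.Str.findFrom_eq] using hj)
        simp only [j, PySem.Str.findFrom_eq]
        omega)
termination_by prompt.toList.length + 1 - pos
decreasing_by
  obtain ⟨h1, h2⟩ := findFrom_facts prompt.toList pos h
    (by simpa [j, PySem.Str.findFrom_eq] using hj)
  simp only [j, PySem.Str.findFrom_eq]
  omega

def stop_at_inst_alt (prompt : String) : List Int :=
  stop_at_inst_go prompt 0 (Nat.zero_le _)

-- ===== PRECONDITION & SPEC =====
def Spec_stop_at_inst (prompt : String) (out : List Int) : Prop := out = stop_at_inst_alt prompt
instance (prompt : String) (out : List Int) : Decidable (Spec_stop_at_inst prompt out) := by unfold Spec_stop_at_inst; infer_instance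

-- ===== CLAIM (what is proved, stated in full; the proofs are below) =====
def Claim_equal_stop_at_inst : Prop := ∀ (prompt : String), Dom_stop_at_inst prompt → Spec_stop_at_inst prompt (stop_at_inst prompt)

-- ===== LEMMAS AND PROOFS =====

-- the common reference value: end indices (i+7) of all occurrence starts i, ascending
def occEnds (s : List Char) (pos : Nat) : List Int :=
  ((List.range (s.length - 6)).filter
      (fun i => pos ≤ i ∧ "[/INST]".toList <+: s.drop i)).map (fun i : Nat => (i : Int) + 7)

theorem occ_lt (s : List Char) (i : Nat) (h : "[/INST]".toList <+: s.drop i) :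
    i < s.length - 6 := by
  have := h.length_le
  simp [List.length_drop] at this
  omega

theorem pointwise_eq (prompt : String) (i : Nat) :
    (PySem.Str.slice prompt (some ((i : Int))) (some ((i : Int) + 7)) == "[/INST]") =
      decide ("[/INST]".toList <+: prompt.toList.drop i) := by
  have h7 : ((i : Int) + 7) = ((i : Int) + ((7 : Nat) : Int)) := by norm_num
  rw [Bool.eq_iff_iff, beq_iff_eq, String.ext_iff, PySem.Str.toList_slice,
    PySem.Chars.slice_eq_listSlice, h7, PySem.List.slice_natCast_add]
  simp only [decide_eq_true_eq]
  constructor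
  · intro he
    rw [List.prefix_iff_eq_take]
    exact he.symm
  · intro hp
    rw [List.prefix_iff_eq_take] at hp
    exact hp.symm

theorem A_eq_occEnds (prompt : String) : stop_at_inst prompt = occEnds prompt.toList 0 := by
  simp only [stop_at_inst, occEnds]
  have hl : PySem.Str.len "[/INST]" = 7 := rfl
  rw [hl, PySem.Str.len_eq]
  rcases Nat.lt_or_ge 6 prompt.toList.length with hn | hn
  case inr =>
    -- too short: both sides are []
    rw [PySem.List.pyRange_neg_one_eq_nil (by omega)]
    have : prompt.toList.length - 6 = 0 := by omega
    rw [this]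
    rfl
  case inl =>
    rw [PySem.List.pyRange_neg_one_eq_reverse]
    have h0 : ((prompt.toList.length : Int) - 7 + 1) = ((prompt.toList.length - 6 : Nat) : Int) := by
      push_cast [Nat.cast_sub (by omega : 6 ≤ prompt.toList.length)]
      ring
    rw [show ((-1 : Int) + 1) = 0 by norm_num, h0, PySem.List.pyRange_zero_natCast,
      PySem.List.foldl_append_if, List.nil_append, List.filter_reverse, List.map_reverse,
      List.reverse_reverse, List.filter_map, List.map_map]
    apply congrArg
    apply List.filter_congr
    intro i _
    simp only [Function.comp_apply, pointwise_eq, Nat.zero_le, true_and]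

theorem filter_range_split (P : Nat → Prop) [DecidablePred P] (m pos q : Nat)
    (hpq : pos ≤ q) (hqm : q < m) (hq : P q)
    (hmin : ∀ i, pos ≤ i → i < q → ¬ P i) :
    (List.range m).filter (fun i => decide (pos ≤ i ∧ P i)) =
      q :: (List.range m).filter (fun i => decide (q + 1 ≤ i ∧ P i)) := by
  have hsplit : List.range m = List.range' 0 q ++ (q :: List.range' (q + 1) (m - q - 1)) := by
    have h1 := List.range'_append (s := 0) (m := q) (n := m - q) (step := 1)
    rw [Nat.zero_add, Nat.one_mul, show q + (m - q) = m by omega] at h1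
    rw [List.range_eq_range', ← h1]
    congr 1
    obtain ⟨k, hk⟩ : ∃ k, m - q = k + 1 := ⟨m - q - 1, by omega⟩
    rw [hk, List.range'_succ, Nat.add_sub_cancel]
  have hfr1 : (List.range' 0 q).filter (fun i => decide (pos ≤ i ∧ P i)) = [] := by
    rw [List.filter_eq_nil_iff]
    intro a ha
    rw [List.mem_range'_1] at ha
    simp only [decide_eq_true_eq, not_and]
    intro har
    exact hmin a har (by omega)
  have hfr2 : (List.range' 0 q).filter (fun i => decide (q + 1 ≤ i ∧ P i)) = [] := by
    rw [List.filter_eq_nil_iff]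
    intro a ha
    rw [List.mem_range'_1] at ha
    simp only [decide_eq_true_eq, not_and]
    intro har
    omega
  have htail : (List.range' (q + 1) (m - q - 1)).filter (fun i => decide (pos ≤ i ∧ P i)) =
      (List.range' (q + 1) (m - q - 1)).filter (fun i => decide (q + 1 ≤ i ∧ P i)) := by
    apply List.filter_congr
    intro x hx
    rw [List.mem_range'_1] at hx
    rw [decide_eq_decide]
    constructor <;> intro hh <;> exact ⟨by omega, hh.2⟩
  rw [hsplit]
  simp only [List.filter_append, hfr1, hfr2, List.nil_append, List.filter_cons]
  rw [if_pos (by simp [hpq, hq]), if_neg (by simp), htail]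

theorem go_eq_occEnds (prompt : String) (pos : Nat) (h : pos ≤ prompt.toList.length) :
    stop_at_inst_go prompt pos h = occEnds prompt.toList pos := by
  rw [stop_at_inst_go]
  simp only [PySem.Str.findFrom_eq]
  by_cases hj : PySem.Chars.findFrom prompt.toList "[/INST]".toList (pos : Int) = -1
  · rw [dif_pos hj]
    rw [PySem.Chars.findFrom_natCast_eq_neg_one_iff _ _ pos h] at hj
    unfold occEnds
    rw [List.filter_eq_nil_iff.2, List.map_nil]
    intro a ha
    simp only [decide_eq_true_eq, not_and]
    intro hpa hpre
    apply hj
    rw [← PySem.Chars.isIn_iff_infix, ← PySem.Chars.exists_prefix_drop_iff_isIn]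
    refine ⟨a - pos, ?_⟩
    rwa [List.drop_drop, show pos + (a - pos) = a by omega]
  · rw [dif_neg hj]
    obtain ⟨h1, h2, h3⟩ := PySem.Chars.findFrom_natCast_spec prompt.toList "[/INST]".toList pos h hj
    obtain ⟨-, hlen⟩ := findFrom_facts prompt.toList pos h hj
    set j := PySem.Chars.findFrom prompt.toList "[/INST]".toList (pos : Int) with hjdef
    have hrec := go_eq_occEnds prompt (j.toNat + 1) (by omega)
    rw [hrec]
    unfold occEnds
    rw [filter_range_split (fun i => "[/INST]".toList <+: prompt.toList.drop i) _ pos j.toNat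
      (by omega) (occ_lt _ _ h2) h2 h3]
    rw [List.map_cons]
    congr 1
    omega
termination_by prompt.toList.length + 1 - pos
decreasing_by
  omega

-- ===== VERDICT (by name: the statement is the Claim_ definition above) =====
theorem stop_at_inst_spec : Claim_equal_stop_at_inst := by
  intro prompt _
  unfold Spec_stop_at_inst stop_at_inst_alt
  rw [A_eq_occEnds, go_eq_occEnds]
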